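-- pv_equiv track=rewrite | github.com/nacho-bytes/upv_gii | 4r/1r Quatrimestre/ALT/Contenido Lessons/Teoría/T2. Búsqueda con retroceso/Ejemplo_Cajas_all.py | cajas
-- ===== SOURCE A (Python) =====
-- def cajas(w,s):
--   # w es una lista python de pesos, el peso de cada objeto
--   # s es una lista python de pesos, el peso que soporta
--   # asumimos len(w)==len(s)
--   N = len(w)
--   soluciones = []
--
--   def terminal(listaCajas):
--     return len(listaCajas)==N
--
--   def prometedor(listaCajas):
--     ultima = listaCajas[-1]
--     debajo = listaCajas[:-1]
--     return (ultima not in debajo and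
--             s[ultima]>=sum(w[i] for i in range(N) if i not in listaCajas))
--
--   def ramificar(listaCajas):
--     return (listaCajas+[hijo] for hijo in range(N))
--
--   def backtracking(listaCajas):
--     if terminal(listaCajas):
--       # prometedor+terminal->factible
--       soluciones.append(listaCajas)
--     else:
--       for hijo in ramificar(listaCajas):
--         if prometedor(hijo):
--           backtracking(hijo)
--     return None
--
--   backtracking([])
--   return soluciones
-- ===== SOURCE B (Python) =====
-- def cajas(w, s):
--     # Top-down recursion that returns the solution lists and threads the
--     # remaining (unplaced) weight incrementally instead of re-summing it,
--     # with a set of used indices instead of last/prefix list scans.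
--     N = len(w)
--
--     def rec(prefix, used, rem):
--         if len(prefix) == N:
--             return [prefix]
--         out = []
--         for h in range(N):
--             if h not in used and s[h] >= rem - w[h]:
--                 out.extend(rec(prefix + [h], used | {h}, rem - w[h]))
--         return out
--
--     return rec([], set(), sum(w))
-- ===== Notes on version B (the rewrite author's own statement) =====
-- stated objective: alternative
-- what changed: Replaces the mutating backtracking closure (which re-sums the unplaced weight over range(N) on every prometedor test and scans the prefix via last/slice membership) by a value-returning recursion that threads the remaining weight incrementally and a set of used indices, so no inner sum or prefix slice is recomputed.
import Mathlib
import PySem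

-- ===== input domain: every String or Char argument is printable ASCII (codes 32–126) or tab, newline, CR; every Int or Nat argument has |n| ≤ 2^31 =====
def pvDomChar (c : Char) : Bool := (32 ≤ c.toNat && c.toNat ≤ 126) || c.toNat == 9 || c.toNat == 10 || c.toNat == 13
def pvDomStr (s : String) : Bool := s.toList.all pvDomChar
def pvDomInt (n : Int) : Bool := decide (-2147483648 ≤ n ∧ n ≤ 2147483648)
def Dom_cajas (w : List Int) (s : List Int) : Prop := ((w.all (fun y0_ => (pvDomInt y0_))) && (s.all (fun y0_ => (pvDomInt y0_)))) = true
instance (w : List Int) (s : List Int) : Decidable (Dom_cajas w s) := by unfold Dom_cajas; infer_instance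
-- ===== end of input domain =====

-- B replaces A's mutating backtracking (which re-sums the unplaced weight on every
-- promising test) by a recursion that returns the solution lists, threading the
-- remaining weight and a set of used indices incrementally (objective: alternative).

-- ===== PORT A =====
-- sum(w[i] for i in range(N) if i not in listaCajas)  (i always in range since N = len(w), so getD is exact)
def cajasSumRest (w : List Int) (lc : List Int) : Int :=
  (PySem.List.pyRange 0 (w.length : Int) 1).foldl
    (fun acc i => if i ∈ lc then acc else acc + PySem.List.pyGetD w i 0) 0

-- prometedor(listaCajas); 'none' branches are Python IndexError paths, unreachable
-- at every call site under Pre_cajas (listaCajas nonempty, ultima < len(s))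
def cajasPromet (w : List Int) (s : List Int) (lc : List Int) : Bool :=
  match PySem.List.pyGet? lc (-1) with
  | none => false
  | some ultima =>
    let debajo := PySem.List.slice lc none (some (-1))
    decide (ultima ∉ debajo) &&
      (match PySem.List.pyGet? s ultima with
       | none => false
       | some sv => decide (sv ≥ cajasSumRest w lc))

-- backtracking, fuel = N - len(listaCajas) (each call appends one element)
def cajasBT (w : List Int) (s : List Int) : Nat → List Int → List (List Int)
  | 0, lc => if lc.length = w.length then [lc] else []
  | g + 1, lc =>
    if lc.length = w.length then [lc]
    else
      (PySem.List.pyRange 0 (w.length : Int) 1).foldl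
        (fun acc h =>
          if cajasPromet w s (lc ++ [h]) then acc ++ cajasBT w s g (lc ++ [h]) else acc) []

def cajas (w : List Int) (s : List Int) : List (List Int) :=
  cajasBT w s w.length []

-- ===== PORT B =====
def cajasRec (w : List Int) (s : List Int) : Nat → List Int → PySem.Set Int → Int → List (List Int)
  | 0, pre, _, _ => if pre.length = w.length then [pre] else []
  | g + 1, pre, used, rem =>
    if pre.length = w.length then [pre]
    else
      (PySem.List.pyRange 0 (w.length : Int) 1).foldl
        (fun acc h =>
          if !(PySem.Set.contains used h) &&
              decide (PySem.List.pyGetD s h 0 ≥ rem - PySem.List.pyGetD w h 0)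
          then acc ++ cajasRec w s g (pre ++ [h]) (PySem.Set.add used h)
                 (rem - PySem.List.pyGetD w h 0)
          else acc) []

def cajas_alt (w : List Int) (s : List Int) : List (List Int) :=
  cajasRec w s w.length [] PySem.Set.empty w.sum

-- ===== PRECONDITION & SPEC =====
-- Pre_ excludes only inputs where A raises IndexError: with w nonempty, prometedor
-- evaluates s[ultima] for every root child, so len(s) < len(w) raises.
def Pre_cajas (w : List Int) (s : List Int) : Prop := w = [] ∨ w.length ≤ s.length
instance (w : List Int) (s : List Int) : Decidable (Pre_cajas w s) := by
  unfold Pre_cajas; infer_instance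

def pvWitness_cajas : List Int × List Int := ([1, 2], [3, 1])

def Spec_cajas (w : List Int) (s : List Int) (out : List (List Int)) : Prop := out = cajas_alt w s
instance (w : List Int) (s : List Int) (out : List (List Int)) : Decidable (Spec_cajas w s out) := by unfold Spec_cajas; infer_instance

-- ===== CLAIM (what is proved, stated in full; the proofs are below) =====
def Claim_equal_cajas : Prop := ∀ (w : List Int) (s : List Int), Dom_cajas w s → Pre_cajas w s → Spec_cajas w s (cajas w s)

-- ===== LEMMAS AND PROOFS =====

-- the sum A recomputes, as a mapped sum
lemma cajasSumRest_eq_sum (w lc : List Int) :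
    cajasSumRest w lc =
      ((PySem.List.pyRange 0 (w.length : Int) 1).map
        (fun i => if i ∈ lc then 0 else PySem.List.pyGetD w i 0)).sum := by
  unfold cajasSumRest
  rw [show (fun (acc : Int) i => if i ∈ lc then acc else acc + PySem.List.pyGetD w i 0)
      = (fun (acc : Int) i => acc + (if i ∈ lc then 0 else PySem.List.pyGetD w i 0)) by
    funext acc i; split_ifs <;> simp]
  rw [PySem.List.foldl_add]
  simp

lemma cajasSumRest_nil (w : List Int) : cajasSumRest w [] = w.sum := by
  rw [cajasSumRest_eq_sum]
  simp [PySem.List.map_pyGetD_pyRange_zero']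

lemma cajasSumRest_snoc (w lc : List Int) (h : Int) (h0 : 0 ≤ h) (hN : h < (w.length : Int))
    (hnot : h ∉ lc) :
    cajasSumRest w (lc ++ [h]) = cajasSumRest w lc - PySem.List.pyGetD w h 0 := by
  rw [cajasSumRest_eq_sum, cajasSumRest_eq_sum]
  rw [PySem.List.pyRange_one_append 0 h (w.length : Int) h0 (le_of_lt hN),
      PySem.List.pyRange_one_cons hN]
  simp only [List.map_append, List.map_cons, List.sum_append, List.sum_cons]
  have e1 : ∀ L : List Int, (PySem.List.pyRange 0 h 1).map
      (fun i => if i ∈ L ++ [h] then (0:Int) else PySem.List.pyGetD w i 0)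
      = (PySem.List.pyRange 0 h 1).map
      (fun i => if i ∈ L then (0:Int) else PySem.List.pyGetD w i 0) := by
    intro L
    apply List.map_congr_left
    intro i hi
    have : i < h := (PySem.List.mem_pyRange_one.mp hi).2
    have : i ≠ h := by omega
    simp [List.mem_append, this]
  have e2 : ∀ L : List Int, (PySem.List.pyRange (h+1) (w.length : Int) 1).map
      (fun i => if i ∈ L ++ [h] then (0:Int) else PySem.List.pyGetD w i 0)
      = (PySem.List.pyRange (h+1) (w.length : Int) 1).map
      (fun i => if i ∈ L then (0:Int) else PySem.List.pyGetD w i 0) := by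
    intro L
    apply List.map_congr_left
    intro i hi
    have : h + 1 ≤ i := (PySem.List.mem_pyRange_one.mp hi).1
    have : i ≠ h := by omega
    simp [List.mem_append, this]
  rw [e1 lc, e2 lc]
  have hmem : h ∈ lc ++ [h] := by simp
  simp [hmem, hnot]
  ring

-- A's prometedor on a child lc ++ [h], unfolded to B's test data
lemma cajasPromet_snoc (w s : List Int) (hs : w.length ≤ s.length)
    (lc : List Int) (h : Int) (h0 : 0 ≤ h) (hN : h < (w.length : Int)) :
    cajasPromet w s (lc ++ [h]) =
      (decide (h ∉ lc) &&
        decide (PySem.List.pyGetD s h 0 ≥ cajasSumRest w (lc ++ [h]))) := by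
  unfold cajasPromet
  rw [PySem.List.pyGet?_neg_one_append_singleton]
  have hdeb : PySem.List.slice (lc ++ [h]) none (some (-1)) = lc := by
    rw [PySem.List.slice_to_neg_one]
    exact List.dropLast_concat
  have hslen : h < (s.length : Int) := by omega
  have hsget : PySem.List.pyGet? s h = some (PySem.List.pyGetD s h 0) := by
    rw [PySem.List.pyGet?_eq_some_getElem s h0 hslen, PySem.List.pyGetD_eq_getElem s 0 h0 hslen]
  rw [hdeb]
  simp [hsget]

-- main invariant: B's recursion with used = set(prefix) and rem = remaining weight
-- equals A's backtracking
lemma cajasRec_eq_BT (w s : List Int) (hs : w.length ≤ s.length) :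
    ∀ (gas : Nat) (lc : List Int), lc.Nodup → (∀ x ∈ lc, 0 ≤ x ∧ x < (w.length : Int)) →
      cajasRec w s gas lc (PySem.Set.ofList lc) (cajasSumRest w lc) = cajasBT w s gas lc := by
  intro gas
  induction gas with
  | zero => intro lc _ _; rfl
  | succ g ih =>
    intro lc hnd hbound
    unfold cajasRec cajasBT
    by_cases hterm : lc.length = w.length
    · simp [hterm]
    · simp only [hterm, if_false]
      apply PySem.List.foldl_congr_mem
      intro acc h hmem
      obtain ⟨h0, hN⟩ := PySem.List.mem_pyRange_one.mp hmem
      have hcontains : PySem.Set.contains (PySem.Set.ofList lc) h = decide (h ∈ lc) := by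
        by_cases hin : h ∈ lc
        · simp [hin]
        · simp only [hin, decide_false]
          by_contra hc
          simp only [Bool.not_eq_false] at hc
          exact hin ((PySem.Set.mem_ofList lc h).mp
            ((PySem.Set.contains_iff (PySem.Set.ofList lc) h).mp hc))
      rw [cajasPromet_snoc w s hs lc h h0 hN]
      by_cases hin : h ∈ lc
      · simp [hin]
      · have hsum := cajasSumRest_snoc w lc h h0 hN hin
        have hcond : (!(PySem.Set.contains (PySem.Set.ofList lc) h) &&
            decide (PySem.List.pyGetD s h 0 ≥ cajasSumRest w lc - PySem.List.pyGetD w h 0))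
            = (decide (h ∉ lc) &&
            decide (PySem.List.pyGetD s h 0 ≥ cajasSumRest w (lc ++ [h]))) := by
          rw [hcontains, hsum]; simp [hin]
        rw [hcond]
        by_cases hc2 : (decide (h ∉ lc) &&
            decide (PySem.List.pyGetD s h 0 ≥ cajasSumRest w (lc ++ [h]))) = true
        · rw [hc2]
          simp only [if_true]
          congr 1
          rw [← hsum, ← PySem.Set.ofList_append_singleton]
          exact ih (lc ++ [h])
            (by simp [List.nodup_append, hnd]
                intro a ha heq
                exact hin (heq ▸ ha))
            (by intro x hx
                rcases List.mem_append.mp hx with hx | hx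
                · exact hbound x hx
                · simp at hx; subst hx; exact ⟨h0, hN⟩)
        · rw [Bool.not_eq_true] at hc2
          rw [hc2]
          simp

-- ===== VERDICT (by name: the statement is the Claim_ definition above) =====
theorem cajas_spec : Claim_equal_cajas := by
  intro w s _ hpre
  unfold Spec_cajas cajas cajas_alt
  rcases hpre with hw | hs
  · subst hw; rfl
  · have := cajasRec_eq_BT w s hs w.length [] List.nodup_nil (by intro x hx; simp at hx)
    rw [← this, cajasSumRest_nil]
    rfl
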